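-- pv_equiv track=rewrite | github.com/iamadamzc/TLDW | ffmpeg_service.py | _mask_cookie_header
-- ===== SOURCE A (Python) =====
-- def _mask_cookie_header(cookie_header: str) -> str:
--     """
--     Mask cookie values for logging while preserving structure.
--
--     Args:
--         cookie_header: Cookie header string
--
--     Returns:
--         Cookie header with values masked
--     """
--     if not cookie_header:
--         return ""
--
--     try:
--         masked_pairs = []
--         for pair in cookie_header.split("; "):
--             if "=" in pair:
--                 name, _ = pair.split("=", 1)
--                 masked_pairs.append(f"{name}=***MASKED***")
--             else:
--                 masked_pairs.append(pair)
--
--         return "; ".join(masked_pairs)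
--
--     except Exception:
--         return "***MASKED_COOKIES***"
-- ===== SOURCE B (Python) =====
-- def _mask_cookie_header(cookie_header: str) -> str:
--     """One-pass scan: copy characters, and on the first '=' of each
--     '; '-separated segment emit '=***MASKED***' and jump to the next '; '."""
--     if not cookie_header:
--         return ""
--     out = []
--     i = 0
--     n = len(cookie_header)
--     while i < n:
--         c = cookie_header[i]
--         if c == '=':
--             out.append('=***MASKED***')
--             j = cookie_header.find('; ', i + 1)
--             if j == -1:
--                 break
--             out.append('; ')
--             i = j + 2
--         else:
--             out.append(c)
--             i += 1
--     return ''.join(out)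
-- ===== Notes on version B (the rewrite author's own statement) =====
-- stated objective: alternative
-- what changed: Replaced split-on-'; '/per-segment-split/join with a single left-to-right character scan that masks from each segment's first '=' up to the next '; ' delimiter.
import Mathlib
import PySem

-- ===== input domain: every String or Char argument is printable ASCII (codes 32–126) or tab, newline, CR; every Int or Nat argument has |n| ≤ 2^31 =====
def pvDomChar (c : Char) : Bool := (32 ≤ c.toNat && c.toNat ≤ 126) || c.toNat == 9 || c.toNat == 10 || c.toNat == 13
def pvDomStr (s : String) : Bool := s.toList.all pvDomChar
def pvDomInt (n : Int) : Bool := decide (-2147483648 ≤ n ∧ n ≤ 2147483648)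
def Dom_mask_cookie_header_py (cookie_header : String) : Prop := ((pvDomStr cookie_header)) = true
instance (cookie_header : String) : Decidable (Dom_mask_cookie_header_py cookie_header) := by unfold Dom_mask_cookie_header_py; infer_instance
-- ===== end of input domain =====

-- B replaces A's split/loop/join with a single left-to-right character scan; objective: alternative (same cost).

-- ===== PORT A =====
def pvSep : List Char := [';', ' ']
def pvMaskSuffix : List Char := ['=', '*', '*', '*', 'M', 'A', 'S', 'K', 'E', 'D', '*', '*', '*']

-- one iteration of A's loop body: mask the pair if it contains '='
def maskPairA (pair : List Char) : List Char :=
  if PySem.Chars.isIn ['='] pair then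
    -- name, _ = pair.split("=", 1); f"{name}=***MASKED***"
    (match PySem.Chars.splitOnMax pair ['='] 1 with
     | name :: _ => name
     | [] => []) ++ pvMaskSuffix
  else pair

def mask_cookie_header_py (cookie_header : String) : String :=
  if cookie_header = "" then ""
  else
    String.ofList (PySem.Chars.join pvSep
      ((PySem.Chars.splitOn cookie_header.toList pvSep).foldl
        (fun acc pair => acc ++ [maskPairA pair]) []))

-- ===== PORT B =====
-- B's while loop as structural recursion on the remaining suffix:
-- copy chars; at '=' emit the mask and jump past the next '; ' (found with find).
def altGo : List Char → List Char
  | [] => []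
  | c :: rest =>
    if c = '=' then
      pvMaskSuffix ++
        (let j := PySem.Chars.find rest pvSep
         if j = -1 then []
         else pvSep ++ altGo (rest.drop (j.toNat + 2)))
    else c :: altGo rest
termination_by l => l.length
decreasing_by all_goals (simp only [List.length_cons, List.length_drop]; omega)

def mask_cookie_header_py_alt (cookie_header : String) : String :=
  if cookie_header = "" then "" else String.ofList (altGo cookie_header.toList)

-- ===== PRECONDITION & SPEC =====
def Spec_mask_cookie_header_py (cookie_header : String) (out : String) : Prop := out = mask_cookie_header_py_alt cookie_header
instance (cookie_header : String) (out : String) : Decidable (Spec_mask_cookie_header_py cookie_header out) := by unfold Spec_mask_cookie_header_py; infer_instance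

-- ===== CLAIM (what is proved, stated in full; the proofs are below) =====
def Claim_equal_mask_cookie_header_py : Prop := ∀ (cookie_header : String), Dom_mask_cookie_header_py cookie_header → Spec_mask_cookie_header_py cookie_header (mask_cookie_header_py cookie_header)

-- ===== LEMMAS AND PROOFS =====

-- the segments of l split on "; ", structurally
def segs : List Char → List (List Char)
  | [] => [[]]
  | c :: rest =>
    if List.isPrefixOf pvSep (c :: rest) then [] :: segs (rest.drop 1)
    else (segs rest).modifyHead (c :: ·)
termination_by l => l.length
decreasing_by all_goals (simp only [List.length_cons, List.length_drop]; omega)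

theorem segs_ne_nil (l : List Char) : segs l ≠ [] := by
  cases l with
  | nil => rw [segs]; simp
  | cons c rest =>
    rw [segs]
    split
    · simp
    · intro h
      obtain ⟨h0, t0, ht⟩ : ∃ h0 t0, segs rest = h0 :: t0 := by
        cases hs : segs rest with
        | nil => exact absurd hs (segs_ne_nil rest)
        | cons a b => exact ⟨a, b, rfl⟩
      rw [ht] at h
      simp at h

theorem splitOn_go_spec (fuel : Nat) : ∀ (l cur : List Char) (acc : List (List Char)),
    l.length < fuel →
    PySem.Chars.splitOn.go pvSep fuel l cur acc
      = acc.reverse ++ (segs l).modifyHead (cur.reverse ++ ·) := by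
  induction fuel with
  | zero => intro l cur acc h; omega
  | succ n ih =>
    intro l cur acc h
    cases l with
    | nil =>
      rw [PySem.Chars.splitOn.go]
      · simp [segs]
      · omega
    | cons c rest =>
      rw [PySem.Chars.splitOn.go]
      by_cases hp : List.isPrefixOf pvSep (c :: rest) = true
      · simp only [hp, if_true]
        rw [ih (List.drop pvSep.length (c :: rest)) [] (cur.reverse :: acc)
            (by simp [pvSep] at *; omega)]
        have hseg : segs (c :: rest) = [] :: segs (rest.drop 1) := by
          rw [segs]; simp [hp]
        rw [hseg]
        obtain ⟨h0, t0, ht⟩ : ∃ h0 t0, segs (rest.drop 1) = h0 :: t0 := by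
          cases hs : segs (rest.drop 1) with
          | nil => exact absurd hs (segs_ne_nil _)
          | cons a b => exact ⟨a, b, rfl⟩
        rw [List.drop_one] at ht
        simp [pvSep, ht]
      · simp only [hp]
        rw [ih rest (c :: cur) acc (by simp at h ⊢; omega)]
        have hseg : segs (c :: rest) = (segs rest).modifyHead (c :: ·) := by
          rw [segs]; simp [hp]
        rw [hseg]
        obtain ⟨h0, t0, ht⟩ : ∃ h0 t0, segs rest = h0 :: t0 := by
          cases hs : segs rest with
          | nil => exact absurd hs (segs_ne_nil rest)
          | cons a b => exact ⟨a, b, rfl⟩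
        simp [ht]

theorem splitOn_eq_segs (cs : List Char) :
    PySem.Chars.splitOn cs pvSep = segs cs := by
  unfold PySem.Chars.splitOn
  rw [splitOn_go_spec (cs.length + 1) cs [] [] (by omega)]
  obtain ⟨h0, t0, ht⟩ : ∃ h0 t0, segs cs = h0 :: t0 := by
    cases hs : segs cs with
    | nil => exact absurd hs (segs_ne_nil cs)
    | cons a b => exact ⟨a, b, rfl⟩
  simp [ht]

-- splitOnMax with sep "=" and maxsplit 0: one piece
theorem splitOnMax_go_zero (fuel : Nat) (l cur : List Char) (acc : List (List Char))
    (h : 0 < fuel) :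
    PySem.Chars.splitOnMax.go ['='] fuel 0 l cur acc = acc.reverse ++ [cur.reverse ++ l] := by
  cases fuel with
  | zero => omega
  | succ n =>
    cases l with
    | nil => rw [PySem.Chars.splitOnMax.go] <;> simp
    | cons c rest => rw [PySem.Chars.splitOnMax.go] ; simp

-- splitOnMax with sep "=" and maxsplit 1: the head of the result
theorem splitOnMax_go_one (fuel : Nat) : ∀ (l cur : List Char) (acc : List (List Char)),
    l.length < fuel →
    ∃ t, PySem.Chars.splitOnMax.go ['='] fuel 1 l cur acc
      = acc.reverse ++ (cur.reverse ++ l.takeWhile (· ≠ '=')) :: t := by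
  induction fuel with
  | zero => intro l cur acc h; omega
  | succ n ih =>
    intro l cur acc h
    cases l with
    | nil =>
      rw [PySem.Chars.splitOnMax.go]
      · exact ⟨[], by simp⟩
      · omega
    | cons c rest =>
      rw [PySem.Chars.splitOnMax.go]
      by_cases hc : c = '='
      · have hp : List.isPrefixOf ['='] (c :: rest) = true := by
          subst hc; simp [List.isPrefixOf]
        simp only [hp, if_true, Nat.one_ne_zero, if_false]
        rw [splitOnMax_go_zero n (List.drop ['='].length (c :: rest)) [] (cur.reverse :: acc)
            (by simp at h; omega)]
        refine ⟨[rest], ?_⟩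
        subst hc
        simp [List.takeWhile]
      · have hp : List.isPrefixOf ['='] (c :: rest) = false := by
          simp [List.isPrefixOf]; exact fun h' => absurd h'.symm hc
        simp only [hp, Nat.one_ne_zero, if_false, Bool.false_eq_true]
        obtain ⟨t, ht⟩ := ih rest (c :: cur) acc (by simp at h ⊢; omega)
        refine ⟨t, ?_⟩
        rw [ht]
        simp [List.takeWhile, hc]

-- A's per-pair masking, characterised without the fuel machinery
def maskP (p : List Char) : List Char :=
  if '=' ∈ p then p.takeWhile (· ≠ '=') ++ pvMaskSuffix else p

theorem maskPairA_eq_maskP : maskPairA = maskP := by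
  funext p
  unfold maskPairA maskP
  have hmem : PySem.Chars.isIn ['='] p = true ↔ '=' ∈ p := by
    rw [PySem.Chars.isIn_iff_infix, List.singleton_infix_iff]
  by_cases hm : '=' ∈ p
  · rw [if_pos (hmem.mpr hm), if_pos hm]
    unfold PySem.Chars.splitOnMax
    rw [if_neg (by omega)]
    obtain ⟨t, ht⟩ := splitOnMax_go_one (p.length + 1) p [] [] (by omega)
    rw [Int.toNat_one, ht]
    simp
  · rw [if_neg (fun h => hm (hmem.mp h)), if_neg hm]

theorem maskP_cons (c : Char) (h : List Char) (hc : c ≠ '=') :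
    maskP (c :: h) = c :: maskP h := by
  unfold maskP
  by_cases hm : '=' ∈ h
  · simp [hm, List.takeWhile, hc]
  · have hnm : '=' ∉ c :: h := by
      simp
      exact ⟨fun x => hc x.symm, hm⟩
    rw [if_neg hnm, if_neg hm]

theorem maskP_eq_head (h : List Char) : maskP ('=' :: h) = pvMaskSuffix := by
  unfold maskP
  simp [List.takeWhile]

-- segs on a list with no "; "
theorem segs_no_sep (l : List Char) (h : ¬ pvSep <:+: l) : segs l = [l] := by
  cases l with
  | nil => rw [segs]
  | cons c rest =>
    rw [segs]
    have hp : List.isPrefixOf pvSep (c :: rest) = false := by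
      rw [Bool.eq_false_iff]
      intro hpre
      exact h (List.IsPrefix.isInfix (List.isPrefixOf_iff_prefix.mp hpre))
    simp only [hp, Bool.false_eq_true, if_false]
    have : ¬ pvSep <:+: rest := fun hi => h (hi.trans (List.suffix_cons c rest).isInfix)
    rw [segs_no_sep rest this]
    rfl
termination_by l.length
decreasing_by subst_vars; simp only [List.length_cons]; omega

-- segs on a list containing "; ": first segment up to find, then recurse past it
theorem segs_sep (l : List Char) (h : pvSep <:+: l) :
    segs l = l.take (PySem.Chars.find l pvSep).toNat
      :: segs (l.drop ((PySem.Chars.find l pvSep).toNat + 2)) := by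
  have hnn : 0 ≤ PySem.Chars.find l pvSep := (PySem.Chars.find_nonneg_iff l pvSep).mpr h
  obtain ⟨hpref, hmin⟩ := PySem.Chars.find_spec hnn
  cases l with
  | nil =>
    exact absurd (List.eq_nil_of_infix_nil h) (by simp [pvSep])
  | cons c rest =>
    rw [segs]
    by_cases hp : List.isPrefixOf pvSep (c :: rest) = true
    · have hk0 : (PySem.Chars.find (c :: rest) pvSep).toNat = 0 := by
        by_contra hne
        exact hmin 0 (Nat.pos_of_ne_zero hne) (by simpa using List.isPrefixOf_iff_prefix.mp hp)
      simp only [hp, if_true, hk0]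
      simp
    · -- not a prefix at position 0, so find = find rest + 1
      have hppre : ¬ pvSep <+: (c :: rest) := fun hh => hp (List.isPrefixOf_iff_prefix.mpr hh)
      have hkpos : 0 < (PySem.Chars.find (c :: rest) pvSep).toNat := by
        rcases Nat.eq_zero_or_pos (PySem.Chars.find (c :: rest) pvSep).toNat with h0 | h0
        · rw [h0] at hpref; simp at hpref; exact absurd hpref hppre
        · exact h0
      set k := (PySem.Chars.find (c :: rest) pvSep).toNat with hk
      have hprest : pvSep <+: rest.drop (k - 1) := by
        have hdrop : (c :: rest).drop k = rest.drop (k - 1) := by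
          have h1 : k - 1 + 1 = k := Nat.succ_pred_eq_of_pos hkpos
          conv_lhs => rw [← h1]
          rw [List.drop_succ_cons]
        rwa [hdrop] at hpref
      have hrinf : pvSep <:+: rest :=
        List.infix_iff_prefix_suffix.mpr ⟨rest.drop (k - 1), hprest, List.drop_suffix _ _⟩
      have hrnn : 0 ≤ PySem.Chars.find rest pvSep := (PySem.Chars.find_nonneg_iff rest pvSep).mpr hrinf
      obtain ⟨hrpref, hrmin⟩ := PySem.Chars.find_spec hrnn
      set m := (PySem.Chars.find rest pvSep).toNat with hm
      have hkm : k = m + 1 := by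
        rcases Nat.lt_trichotomy m (k - 1) with hlt | heq | hgt
        · exact absurd hrpref (by
            have := hmin (m + 1) (by omega)
            simpa using this)
        · omega
        · exact absurd hprest (hrmin (k - 1) hgt)
      simp only [hp, Bool.false_eq_true, if_false]
      rw [segs_sep rest hrinf, ← hm]
      simp [hkm]
termination_by l.length
decreasing_by subst_vars; simp only [List.length_cons]; omega

-- join over a head with one char consed on
theorem join_cons_head (sep : List Char) (c : Char) (h : List Char) (t : List (List Char)) :
    PySem.Chars.join sep ((c :: h) :: t) = c :: PySem.Chars.join sep (h :: t) := by
  cases t with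
  | nil => rw [PySem.Chars.join_singleton, PySem.Chars.join_singleton]
  | cons h2 t2 =>
    rw [PySem.Chars.join_cons_cons, PySem.Chars.join_cons_cons]
    simp

-- the main bridge: B's scan computes A's join-of-masked-segments
theorem altGo_eq (n : Nat) : ∀ l : List Char, l.length ≤ n →
    altGo l = PySem.Chars.join pvSep ((segs l).map maskP) := by
  induction n with
  | zero =>
    intro l hl
    rw [List.length_eq_zero_iff.mp (Nat.le_zero.mp hl)]
    rw [altGo, segs]
    simp [maskP, PySem.Chars.join_singleton]
  | succ n ih =>
    intro l hl
    cases l with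
    | nil =>
      rw [altGo, segs]
      simp [maskP, PySem.Chars.join_singleton]
    | cons c rest =>
      by_cases hc : c = '='
      · -- masking branch
        subst hc
        rw [altGo]
        have hnp : List.isPrefixOf pvSep ('=' :: rest) = false := by
          simp [pvSep, List.isPrefixOf]
        have hsegl : segs ('=' :: rest) = (segs rest).modifyHead ('=' :: ·) := by
          rw [segs]; simp [hnp]
        by_cases hf : PySem.Chars.find rest pvSep = -1
        · have hni : ¬ pvSep <:+: rest := (PySem.Chars.find_eq_neg_one_iff rest pvSep).mp hf
          rw [hsegl, segs_no_sep rest hni]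
          simp only [List.modifyHead, List.map]
          rw [maskP_eq_head, PySem.Chars.join_singleton, hf]
          simp
        · have hnn : 0 ≤ PySem.Chars.find rest pvSep := by
            have := PySem.Chars.neg_one_le_find (s := rest) (sub := pvSep)
            omega
          have hinf : pvSep <:+: rest := (PySem.Chars.find_nonneg_iff rest pvSep).mp hnn
          rw [hsegl, segs_sep rest hinf]
          set m := (PySem.Chars.find rest pvSep).toNat with hm
          simp only [List.modifyHead, List.map]
          rw [maskP_eq_head]
          obtain ⟨h0, t0, ht⟩ : ∃ h0 t0, segs (rest.drop (m + 2)) = h0 :: t0 := by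
            cases hs : segs (rest.drop (m + 2)) with
            | nil => exact absurd hs (segs_ne_nil _)
            | cons a b => exact ⟨a, b, rfl⟩
          rw [ih (rest.drop (m + 2)) (by simp at hl ⊢; omega), ht]
          simp [hf, PySem.Chars.join_cons_cons]
      · by_cases hp : List.isPrefixOf pvSep (c :: rest) = true
        · -- c = ';' and rest = ' ' :: rest'
          have hshape : c = ';' ∧ ∃ rest', rest = ' ' :: rest' := by
            cases rest with
            | nil => simp [pvSep, List.isPrefixOf] at hp
            | cons d rest' =>
              simp [pvSep, List.isPrefixOf] at hp
              exact ⟨hp.1.symm, rest', by rw [hp.2]⟩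
          obtain ⟨hcs, rest', hrest⟩ := hshape
          subst hcs hrest
          have hsegl : segs (';' :: ' ' :: rest') = [] :: segs rest' := by
            rw [segs]; simp [hp]
          rw [hsegl]
          rw [altGo]
          simp only [if_neg hc]
          rw [altGo]
          simp only [if_neg (by decide : ¬ (' ' = '='))]
          rw [ih rest' (by simp at hl ⊢; omega)]
          simp only [List.map]
          obtain ⟨h0, t0, ht⟩ : ∃ h0 t0, segs rest' = h0 :: t0 := by
            cases hs : segs rest' with
            | nil => exact absurd hs (segs_ne_nil _)
            | cons a b => exact ⟨a, b, rfl⟩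
          rw [ht]
          simp only [List.map]
          rw [PySem.Chars.join_cons_cons]
          have : maskP [] = ([] : List Char) := by simp [maskP]
          rw [this]
          simp [pvSep]
        · have hsegl : segs (c :: rest) = (segs rest).modifyHead (c :: ·) := by
            rw [segs]; simp [hp]
          rw [altGo]
          simp only [if_neg hc]
          rw [ih rest (by simp at hl ⊢; omega), hsegl]
          obtain ⟨h0, t0, ht⟩ : ∃ h0 t0, segs rest = h0 :: t0 := by
            cases hs : segs rest with
            | nil => exact absurd hs (segs_ne_nil _)
            | cons a b => exact ⟨a, b, rfl⟩
          rw [ht]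
          simp only [List.modifyHead, List.map]
          rw [maskP_cons c h0 hc, join_cons_head]

-- ===== VERDICT (by name: the statement is the Claim_ definition above) =====
theorem mask_cookie_header_py_spec : Claim_equal_mask_cookie_header_py := by
  intro ch _
  unfold Spec_mask_cookie_header_py mask_cookie_header_py mask_cookie_header_py_alt
  by_cases he : ch = ""
  · simp [he]
  · rw [if_neg he, if_neg he]
    congr 1
    rw [PySem.List.foldl_append_singleton_eq_map, List.nil_append,
        splitOn_eq_segs, maskPairA_eq_maskP,
        altGo_eq ch.toList.length ch.toList (le_refl _)]
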